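-- pv_equiv track=rewrite | github.com/randallabra/music-discovery-agent | tag_sampler.py | assign_lane
-- ===== SOURCE A (Python) =====
-- LANE_SEEDS: dict[str, set[str]] = {
--     "Melancholy Balladry": {
--         "ballad", "sad", "melancholic", "melancholy", "grief", "slowcore",
--         "lullaby", "tearjerker", "dirge",
--     },
--     "Introspective Songcraft": {
--         "singer-songwriter", "storytelling", "confessional", "lyrical",
--         "narrative", "folk", "americana",
--     },
--     "Hook-Perfected Songs": {
--         "power pop", "bubblegum", "hook", "catchy", "motown",
--         "girl group", "boy band",
--     },
--     "Atmospheric / Texture-First": {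
--         "ambient", "drone", "krautrock", "soundscape",
--         "neoclassical", "modern classical", "microsound",
--     },
--     "Propulsive Guitar Rock": {
--         "garage rock", "post-punk", "jangle pop", "college rock",
--         "paisley underground",
--     },
--     "Hybrid Rock (Melody-Led)": {
--         "britpop", "new wave", "pop rock", "alternative pop",
--         "chamber pop",
--     },
--     "Groove-First Rock (Selective)": {
--         "blues rock", "funk rock", "southern rock", "boogie",
--         "swamp rock", "jam band",
--     },
--     "Energy-First Rock (Melody-Bounded)": {
--         "grunge", "post-grunge", "arena rock", "hard rock",
--         "pop punk", "emo", "alternative rock",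
--     },
--     "Rhythm-Dominant Rock (Cathartic)": {
--         "hardcore", "post-hardcore", "math rock", "screamo", "metalcore",
--     },
--     "Texture-First Rock (Atmospheric)": {
--         "shoegaze", "post-rock", "dream pop", "wall of sound",
--         "noise pop",
--     },
--     "Cathartic / Adrenaline Rock": {
--         "thrash metal", "death metal", "black metal", "grindcore",
--         "sludge metal", "doom metal",
--     },
--     "Melody-Anchored Hip-Hop": {
--         "alternative hip hop", "conscious hip hop", "jazz rap",
--         "hip hop soul", "neo soul",
--     },
--     "Groove-First Hip-Hop (Selective)": {
--         "g-funk", "bounce", "gangsta rap", "boom bap", "dirty south",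
--     },
--     "Textural / Atmospheric Hip-Hop": {
--         "cloud rap", "chillhop", "instrumental hip hop", "lo-fi hip hop",
--     },
--     "Melody-Led Jazz (Theme-Centric)": {
--         "bebop", "cool jazz", "hard bop", "vocal jazz", "standards", "big band",
--     },
--     "Harmonic-First Jazz": {
--         "post-bop", "modal jazz", "fusion", "contemporary jazz",
--     },
--     "Spiritual / Expansive Jazz": {
--         "free jazz", "avant-garde jazz", "spiritual jazz",
--     },
--     "Rhythm-Forward Jazz (Selective)": {
--         "latin jazz", "afrobeat", "bossa nova", "samba", "jazz funk",
--     },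
-- }
--
-- def assign_lane(tags: list[tuple[str, int]]) -> str | None:
--     """
--     Return the lane whose seed tags best match the track's tag set.
--     Returns None if no seed matches found.
--     """
--     tag_names = {t for t, _ in tags}
--     scores = {
--         lane: len(seeds & tag_names)
--         for lane, seeds in LANE_SEEDS.items()
--     }
--     best_lane = max(scores, key=scores.get)
--     return best_lane if scores[best_lane] > 0 else None
-- ===== SOURCE B (Python) =====
-- LANES = [
--     'Melancholy Balladry',
--     'Introspective Songcraft',
--     'Hook-Perfected Songs',
--     'Atmospheric / Texture-First',
--     'Propulsive Guitar Rock',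
--     'Hybrid Rock (Melody-Led)',
--     'Groove-First Rock (Selective)',
--     'Energy-First Rock (Melody-Bounded)',
--     'Rhythm-Dominant Rock (Cathartic)',
--     'Texture-First Rock (Atmospheric)',
--     'Cathartic / Adrenaline Rock',
--     'Melody-Anchored Hip-Hop',
--     'Groove-First Hip-Hop (Selective)',
--     'Textural / Atmospheric Hip-Hop',
--     'Melody-Led Jazz (Theme-Centric)',
--     'Harmonic-First Jazz',
--     'Spiritual / Expansive Jazz',
--     'Rhythm-Forward Jazz (Selective)',
-- ]
--
-- TAG_TO_LANE = {
--     'ballad': 'Melancholy Balladry',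
--     'dirge': 'Melancholy Balladry',
--     'grief': 'Melancholy Balladry',
--     'lullaby': 'Melancholy Balladry',
--     'melancholic': 'Melancholy Balladry',
--     'melancholy': 'Melancholy Balladry',
--     'sad': 'Melancholy Balladry',
--     'slowcore': 'Melancholy Balladry',
--     'tearjerker': 'Melancholy Balladry',
--     'americana': 'Introspective Songcraft',
--     'confessional': 'Introspective Songcraft',
--     'folk': 'Introspective Songcraft',
--     'lyrical': 'Introspective Songcraft',
--     'narrative': 'Introspective Songcraft',
--     'singer-songwriter': 'Introspective Songcraft',
--     'storytelling': 'Introspective Songcraft',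
--     'boy band': 'Hook-Perfected Songs',
--     'bubblegum': 'Hook-Perfected Songs',
--     'catchy': 'Hook-Perfected Songs',
--     'girl group': 'Hook-Perfected Songs',
--     'hook': 'Hook-Perfected Songs',
--     'motown': 'Hook-Perfected Songs',
--     'power pop': 'Hook-Perfected Songs',
--     'ambient': 'Atmospheric / Texture-First',
--     'drone': 'Atmospheric / Texture-First',
--     'krautrock': 'Atmospheric / Texture-First',
--     'microsound': 'Atmospheric / Texture-First',
--     'modern classical': 'Atmospheric / Texture-First',
--     'neoclassical': 'Atmospheric / Texture-First',
--     'soundscape': 'Atmospheric / Texture-First',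
--     'college rock': 'Propulsive Guitar Rock',
--     'garage rock': 'Propulsive Guitar Rock',
--     'jangle pop': 'Propulsive Guitar Rock',
--     'paisley underground': 'Propulsive Guitar Rock',
--     'post-punk': 'Propulsive Guitar Rock',
--     'alternative pop': 'Hybrid Rock (Melody-Led)',
--     'britpop': 'Hybrid Rock (Melody-Led)',
--     'chamber pop': 'Hybrid Rock (Melody-Led)',
--     'new wave': 'Hybrid Rock (Melody-Led)',
--     'pop rock': 'Hybrid Rock (Melody-Led)',
--     'blues rock': 'Groove-First Rock (Selective)',
--     'boogie': 'Groove-First Rock (Selective)',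
--     'funk rock': 'Groove-First Rock (Selective)',
--     'jam band': 'Groove-First Rock (Selective)',
--     'southern rock': 'Groove-First Rock (Selective)',
--     'swamp rock': 'Groove-First Rock (Selective)',
--     'alternative rock': 'Energy-First Rock (Melody-Bounded)',
--     'arena rock': 'Energy-First Rock (Melody-Bounded)',
--     'emo': 'Energy-First Rock (Melody-Bounded)',
--     'grunge': 'Energy-First Rock (Melody-Bounded)',
--     'hard rock': 'Energy-First Rock (Melody-Bounded)',
--     'pop punk': 'Energy-First Rock (Melody-Bounded)',
--     'post-grunge': 'Energy-First Rock (Melody-Bounded)',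
--     'hardcore': 'Rhythm-Dominant Rock (Cathartic)',
--     'math rock': 'Rhythm-Dominant Rock (Cathartic)',
--     'metalcore': 'Rhythm-Dominant Rock (Cathartic)',
--     'post-hardcore': 'Rhythm-Dominant Rock (Cathartic)',
--     'screamo': 'Rhythm-Dominant Rock (Cathartic)',
--     'dream pop': 'Texture-First Rock (Atmospheric)',
--     'noise pop': 'Texture-First Rock (Atmospheric)',
--     'post-rock': 'Texture-First Rock (Atmospheric)',
--     'shoegaze': 'Texture-First Rock (Atmospheric)',
--     'wall of sound': 'Texture-First Rock (Atmospheric)',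
--     'black metal': 'Cathartic / Adrenaline Rock',
--     'death metal': 'Cathartic / Adrenaline Rock',
--     'doom metal': 'Cathartic / Adrenaline Rock',
--     'grindcore': 'Cathartic / Adrenaline Rock',
--     'sludge metal': 'Cathartic / Adrenaline Rock',
--     'thrash metal': 'Cathartic / Adrenaline Rock',
--     'alternative hip hop': 'Melody-Anchored Hip-Hop',
--     'conscious hip hop': 'Melody-Anchored Hip-Hop',
--     'hip hop soul': 'Melody-Anchored Hip-Hop',
--     'jazz rap': 'Melody-Anchored Hip-Hop',
--     'neo soul': 'Melody-Anchored Hip-Hop',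
--     'boom bap': 'Groove-First Hip-Hop (Selective)',
--     'bounce': 'Groove-First Hip-Hop (Selective)',
--     'dirty south': 'Groove-First Hip-Hop (Selective)',
--     'g-funk': 'Groove-First Hip-Hop (Selective)',
--     'gangsta rap': 'Groove-First Hip-Hop (Selective)',
--     'chillhop': 'Textural / Atmospheric Hip-Hop',
--     'cloud rap': 'Textural / Atmospheric Hip-Hop',
--     'instrumental hip hop': 'Textural / Atmospheric Hip-Hop',
--     'lo-fi hip hop': 'Textural / Atmospheric Hip-Hop',
--     'bebop': 'Melody-Led Jazz (Theme-Centric)',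
--     'big band': 'Melody-Led Jazz (Theme-Centric)',
--     'cool jazz': 'Melody-Led Jazz (Theme-Centric)',
--     'hard bop': 'Melody-Led Jazz (Theme-Centric)',
--     'standards': 'Melody-Led Jazz (Theme-Centric)',
--     'vocal jazz': 'Melody-Led Jazz (Theme-Centric)',
--     'contemporary jazz': 'Harmonic-First Jazz',
--     'fusion': 'Harmonic-First Jazz',
--     'modal jazz': 'Harmonic-First Jazz',
--     'post-bop': 'Harmonic-First Jazz',
--     'avant-garde jazz': 'Spiritual / Expansive Jazz',
--     'free jazz': 'Spiritual / Expansive Jazz',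
--     'spiritual jazz': 'Spiritual / Expansive Jazz',
--     'afrobeat': 'Rhythm-Forward Jazz (Selective)',
--     'bossa nova': 'Rhythm-Forward Jazz (Selective)',
--     'jazz funk': 'Rhythm-Forward Jazz (Selective)',
--     'latin jazz': 'Rhythm-Forward Jazz (Selective)',
--     'samba': 'Rhythm-Forward Jazz (Selective)',
-- }
--
--
-- def assign_lane(tags: list[tuple[str, int]]) -> str | None:
--     """
--     Return the lane whose seed tags best match the track's tag set.
--     Returns None if no seed matches found.
--     """
--     counts: dict[str, int] = {}
--     for name in {t for t, _ in tags}: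
--         lane = TAG_TO_LANE.get(name)
--         if lane is not None:
--             counts[lane] = counts.get(lane, 0) + 1
--     best = None
--     best_score = 0
--     for lane in LANES:
--         s = counts.get(lane, 0)
--         if s > best_score:
--             best, best_score = lane, s
--     return best
-- ===== Notes on version B (the rewrite author's own statement) =====
-- stated objective: alternative
-- what changed: A's 18 per-lane set intersections followed by a dict max are replaced by a literal tag->lane inverted index (no LANE_SEEDS at all): one pass over the deduplicated tag names increments per-lane counters, and a single strict-greater running-best scan over the lane list replaces max()+the >0 check, yielding the same first-max tie-break and None when all scores are zero.
import Mathlib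
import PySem

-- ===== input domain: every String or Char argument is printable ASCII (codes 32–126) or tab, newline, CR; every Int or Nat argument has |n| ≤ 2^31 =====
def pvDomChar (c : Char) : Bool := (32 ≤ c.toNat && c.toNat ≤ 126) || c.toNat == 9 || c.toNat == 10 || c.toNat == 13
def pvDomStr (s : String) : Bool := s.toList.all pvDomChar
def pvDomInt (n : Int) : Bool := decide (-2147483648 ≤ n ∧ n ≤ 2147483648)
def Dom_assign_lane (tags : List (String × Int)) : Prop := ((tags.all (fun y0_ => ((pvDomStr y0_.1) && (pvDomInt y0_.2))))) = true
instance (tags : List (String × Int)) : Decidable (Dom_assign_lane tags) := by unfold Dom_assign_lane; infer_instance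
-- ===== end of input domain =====

-- B replaces A's per-lane set intersections and dict max by a literal tag→lane inverted
-- index plus a strict-greater running-best scan over the lane list (alternative decomposition).

-- module constant LANE_SEEDS (used by A only)
def laneSeeds : PySem.Dict String (PySem.Set String) := PySem.Dict.ofList [
  ("Melancholy Balladry", PySem.Set.ofList ["ballad", "dirge", "grief", "lullaby", "melancholic", "melancholy", "sad", "slowcore", "tearjerker"]),
  ("Introspective Songcraft", PySem.Set.ofList ["americana", "confessional", "folk", "lyrical", "narrative", "singer-songwriter", "storytelling"]),
  ("Hook-Perfected Songs", PySem.Set.ofList ["boy band", "bubblegum", "catchy", "girl group", "hook", "motown", "power pop"]),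
  ("Atmospheric / Texture-First", PySem.Set.ofList ["ambient", "drone", "krautrock", "microsound", "modern classical", "neoclassical", "soundscape"]),
  ("Propulsive Guitar Rock", PySem.Set.ofList ["college rock", "garage rock", "jangle pop", "paisley underground", "post-punk"]),
  ("Hybrid Rock (Melody-Led)", PySem.Set.ofList ["alternative pop", "britpop", "chamber pop", "new wave", "pop rock"]),
  ("Groove-First Rock (Selective)", PySem.Set.ofList ["blues rock", "boogie", "funk rock", "jam band", "southern rock", "swamp rock"]),
  ("Energy-First Rock (Melody-Bounded)", PySem.Set.ofList ["alternative rock", "arena rock", "emo", "grunge", "hard rock", "pop punk", "post-grunge"]),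
  ("Rhythm-Dominant Rock (Cathartic)", PySem.Set.ofList ["hardcore", "math rock", "metalcore", "post-hardcore", "screamo"]),
  ("Texture-First Rock (Atmospheric)", PySem.Set.ofList ["dream pop", "noise pop", "post-rock", "shoegaze", "wall of sound"]),
  ("Cathartic / Adrenaline Rock", PySem.Set.ofList ["black metal", "death metal", "doom metal", "grindcore", "sludge metal", "thrash metal"]),
  ("Melody-Anchored Hip-Hop", PySem.Set.ofList ["alternative hip hop", "conscious hip hop", "hip hop soul", "jazz rap", "neo soul"]),
  ("Groove-First Hip-Hop (Selective)", PySem.Set.ofList ["boom bap", "bounce", "dirty south", "g-funk", "gangsta rap"]),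
  ("Textural / Atmospheric Hip-Hop", PySem.Set.ofList ["chillhop", "cloud rap", "instrumental hip hop", "lo-fi hip hop"]),
  ("Melody-Led Jazz (Theme-Centric)", PySem.Set.ofList ["bebop", "big band", "cool jazz", "hard bop", "standards", "vocal jazz"]),
  ("Harmonic-First Jazz", PySem.Set.ofList ["contemporary jazz", "fusion", "modal jazz", "post-bop"]),
  ("Spiritual / Expansive Jazz", PySem.Set.ofList ["avant-garde jazz", "free jazz", "spiritual jazz"]),
  ("Rhythm-Forward Jazz (Selective)", PySem.Set.ofList ["afrobeat", "bossa nova", "jazz funk", "latin jazz", "samba"])]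

-- ===== PORT A =====
def assign_lane (tags : List (String × Int)) : Option String :=
  let tagNames : PySem.Set String := PySem.Set.ofList (tags.map (fun t => t.1))
  let scores : PySem.Dict String Int :=
    PySem.Dict.ofList (laneSeeds.items.map (fun p =>
      (p.1, PySem.Set.len (PySem.Set.inter p.2 tagNames))))
  match PySem.List.max? scores.keys (fun l => scores.getD l 0) with
  | none => none
  | some best => if scores.getD best 0 > 0 then some best else none

-- ===== PORT B =====
-- module constant LANES (B's literal lane list, in the original order)
def lanesB : List String := [
  "Melancholy Balladry",
  "Introspective Songcraft",
  "Hook-Perfected Songs",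
  "Atmospheric / Texture-First",
  "Propulsive Guitar Rock",
  "Hybrid Rock (Melody-Led)",
  "Groove-First Rock (Selective)",
  "Energy-First Rock (Melody-Bounded)",
  "Rhythm-Dominant Rock (Cathartic)",
  "Texture-First Rock (Atmospheric)",
  "Cathartic / Adrenaline Rock",
  "Melody-Anchored Hip-Hop",
  "Groove-First Hip-Hop (Selective)",
  "Textural / Atmospheric Hip-Hop",
  "Melody-Led Jazz (Theme-Centric)",
  "Harmonic-First Jazz",
  "Spiritual / Expansive Jazz",
  "Rhythm-Forward Jazz (Selective)"]

-- module constant TAG_TO_LANE (B's literal inverted index; seed sets are disjoint)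
def tagToLaneList : List (String × String) := [
  ("ballad", "Melancholy Balladry"),
  ("dirge", "Melancholy Balladry"),
  ("grief", "Melancholy Balladry"),
  ("lullaby", "Melancholy Balladry"),
  ("melancholic", "Melancholy Balladry"),
  ("melancholy", "Melancholy Balladry"),
  ("sad", "Melancholy Balladry"),
  ("slowcore", "Melancholy Balladry"),
  ("tearjerker", "Melancholy Balladry"),
  ("americana", "Introspective Songcraft"),
  ("confessional", "Introspective Songcraft"),
  ("folk", "Introspective Songcraft"),
  ("lyrical", "Introspective Songcraft"),
  ("narrative", "Introspective Songcraft"),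
  ("singer-songwriter", "Introspective Songcraft"),
  ("storytelling", "Introspective Songcraft"),
  ("boy band", "Hook-Perfected Songs"),
  ("bubblegum", "Hook-Perfected Songs"),
  ("catchy", "Hook-Perfected Songs"),
  ("girl group", "Hook-Perfected Songs"),
  ("hook", "Hook-Perfected Songs"),
  ("motown", "Hook-Perfected Songs"),
  ("power pop", "Hook-Perfected Songs"),
  ("ambient", "Atmospheric / Texture-First"),
  ("drone", "Atmospheric / Texture-First"),
  ("krautrock", "Atmospheric / Texture-First"),
  ("microsound", "Atmospheric / Texture-First"),
  ("modern classical", "Atmospheric / Texture-First"),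
  ("neoclassical", "Atmospheric / Texture-First"),
  ("soundscape", "Atmospheric / Texture-First"),
  ("college rock", "Propulsive Guitar Rock"),
  ("garage rock", "Propulsive Guitar Rock"),
  ("jangle pop", "Propulsive Guitar Rock"),
  ("paisley underground", "Propulsive Guitar Rock"),
  ("post-punk", "Propulsive Guitar Rock"),
  ("alternative pop", "Hybrid Rock (Melody-Led)"),
  ("britpop", "Hybrid Rock (Melody-Led)"),
  ("chamber pop", "Hybrid Rock (Melody-Led)"),
  ("new wave", "Hybrid Rock (Melody-Led)"),
  ("pop rock", "Hybrid Rock (Melody-Led)"),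
  ("blues rock", "Groove-First Rock (Selective)"),
  ("boogie", "Groove-First Rock (Selective)"),
  ("funk rock", "Groove-First Rock (Selective)"),
  ("jam band", "Groove-First Rock (Selective)"),
  ("southern rock", "Groove-First Rock (Selective)"),
  ("swamp rock", "Groove-First Rock (Selective)"),
  ("alternative rock", "Energy-First Rock (Melody-Bounded)"),
  ("arena rock", "Energy-First Rock (Melody-Bounded)"),
  ("emo", "Energy-First Rock (Melody-Bounded)"),
  ("grunge", "Energy-First Rock (Melody-Bounded)"),
  ("hard rock", "Energy-First Rock (Melody-Bounded)"),
  ("pop punk", "Energy-First Rock (Melody-Bounded)"),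
  ("post-grunge", "Energy-First Rock (Melody-Bounded)"),
  ("hardcore", "Rhythm-Dominant Rock (Cathartic)"),
  ("math rock", "Rhythm-Dominant Rock (Cathartic)"),
  ("metalcore", "Rhythm-Dominant Rock (Cathartic)"),
  ("post-hardcore", "Rhythm-Dominant Rock (Cathartic)"),
  ("screamo", "Rhythm-Dominant Rock (Cathartic)"),
  ("dream pop", "Texture-First Rock (Atmospheric)"),
  ("noise pop", "Texture-First Rock (Atmospheric)"),
  ("post-rock", "Texture-First Rock (Atmospheric)"),
  ("shoegaze", "Texture-First Rock (Atmospheric)"),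
  ("wall of sound", "Texture-First Rock (Atmospheric)"),
  ("black metal", "Cathartic / Adrenaline Rock"),
  ("death metal", "Cathartic / Adrenaline Rock"),
  ("doom metal", "Cathartic / Adrenaline Rock"),
  ("grindcore", "Cathartic / Adrenaline Rock"),
  ("sludge metal", "Cathartic / Adrenaline Rock"),
  ("thrash metal", "Cathartic / Adrenaline Rock"),
  ("alternative hip hop", "Melody-Anchored Hip-Hop"),
  ("conscious hip hop", "Melody-Anchored Hip-Hop"),
  ("hip hop soul", "Melody-Anchored Hip-Hop"),
  ("jazz rap", "Melody-Anchored Hip-Hop"),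
  ("neo soul", "Melody-Anchored Hip-Hop"),
  ("boom bap", "Groove-First Hip-Hop (Selective)"),
  ("bounce", "Groove-First Hip-Hop (Selective)"),
  ("dirty south", "Groove-First Hip-Hop (Selective)"),
  ("g-funk", "Groove-First Hip-Hop (Selective)"),
  ("gangsta rap", "Groove-First Hip-Hop (Selective)"),
  ("chillhop", "Textural / Atmospheric Hip-Hop"),
  ("cloud rap", "Textural / Atmospheric Hip-Hop"),
  ("instrumental hip hop", "Textural / Atmospheric Hip-Hop"),
  ("lo-fi hip hop", "Textural / Atmospheric Hip-Hop"),
  ("bebop", "Melody-Led Jazz (Theme-Centric)"),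
  ("big band", "Melody-Led Jazz (Theme-Centric)"),
  ("cool jazz", "Melody-Led Jazz (Theme-Centric)"),
  ("hard bop", "Melody-Led Jazz (Theme-Centric)"),
  ("standards", "Melody-Led Jazz (Theme-Centric)"),
  ("vocal jazz", "Melody-Led Jazz (Theme-Centric)"),
  ("contemporary jazz", "Harmonic-First Jazz"),
  ("fusion", "Harmonic-First Jazz"),
  ("modal jazz", "Harmonic-First Jazz"),
  ("post-bop", "Harmonic-First Jazz"),
  ("avant-garde jazz", "Spiritual / Expansive Jazz"),
  ("free jazz", "Spiritual / Expansive Jazz"),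
  ("spiritual jazz", "Spiritual / Expansive Jazz"),
  ("afrobeat", "Rhythm-Forward Jazz (Selective)"),
  ("bossa nova", "Rhythm-Forward Jazz (Selective)"),
  ("jazz funk", "Rhythm-Forward Jazz (Selective)"),
  ("latin jazz", "Rhythm-Forward Jazz (Selective)"),
  ("samba", "Rhythm-Forward Jazz (Selective)")]

def tagToLane : PySem.Dict String String := PySem.Dict.ofList tagToLaneList

-- loop body: lane = TAG_TO_LANE.get(name); if lane is not None: counts[lane] = counts.get(lane, 0) + 1
def laneTally (d : PySem.Dict String Int) (n : String) : PySem.Dict String Int :=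
  match tagToLane.get? n with
  | some lane => d.modify lane 0 (fun v => v + 1)
  | none => d

def assign_lane_alt (tags : List (String × Int)) : Option String :=
  let counts : PySem.Dict String Int :=
    (PySem.Set.ofList (tags.map (fun t => t.1))).foldl laneTally PySem.Dict.empty
  (lanesB.foldl
    (fun p lane => let s := counts.getD lane 0; if s > p.2 then (some lane, s) else p)
    ((none : Option String), (0 : Int))).1

-- ===== PRECONDITION & SPEC =====
def Spec_assign_lane (tags : List (String × Int)) (out : Option String) : Prop := out = assign_lane_alt tags
instance (tags : List (String × Int)) (out : Option String) : Decidable (Spec_assign_lane tags out) := by unfold Spec_assign_lane; infer_instance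

-- ===== CLAIM (what is proved, stated in full; the proofs are below) =====
def Claim_equal_assign_lane : Prop := ∀ (tags : List (String × Int)), Dom_assign_lane tags → Spec_assign_lane tags (assign_lane tags)

-- ===== LEMMAS AND PROOFS =====

-- the lane names, in LANE_SEEDS order
def pvLanes : List String := laneSeeds.items.map (fun p => p.1)

lemma pv_nodup_lanes : pvLanes.Nodup := by decide

lemma pv_lanesB_eq : lanesB = pvLanes := by decide

set_option maxRecDepth 8192 in
lemma pv_nodup_tagKeys : (PySem.Dict.keys tagToLane).Nodup := by decide

-- the inverted index, flattened: exactly one (tag, lane) pair per seed tag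
set_option maxRecDepth 8192 in
lemma pv_items_tagToLane :
    tagToLane.items = laneSeeds.items.flatMap (fun p => p.2.map (fun t => (t, p.1))) := by decide

lemma pv_seed_nodup : ∀ p ∈ laneSeeds.items, (p.2 : List String).Nodup := by decide

-- a pair in a list with Nodup first components is determined by its first component
lemma pv_eq_of_fst_eq {α β : Type} {l : List (α × β)} (h : (l.map Prod.fst).Nodup)
    {p q : α × β} (hp : p ∈ l) (hq : q ∈ l) (hfst : p.1 = q.1) : p = q := by
  induction l with
  | nil => cases hp
  | cons a t ih =>
    simp only [List.map_cons, List.nodup_cons] at h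
    rcases List.mem_cons.1 hp with rfl | hp' <;> rcases List.mem_cons.1 hq with rfl | hq'
    · rfl
    · exact absurd (hfst ▸ List.mem_map_of_mem hq') h.1
    · exact absurd (hfst ▸ List.mem_map_of_mem hp') h.1
    · exact ih h.2 hp' hq'

-- the inverted lookup: TAG_TO_LANE.get(n) = lane  ↔  n is a seed of that lane
lemma pv_get_tagToLane (n l : String) :
    tagToLane.get? n = some l ↔ ∃ p ∈ laneSeeds.items, l = p.1 ∧ n ∈ (p.2 : List String) := by
  constructor
  · intro h
    have hm := PySem.Dict.mem_items_of_get?_eq_some tagToLane h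
    rw [pv_items_tagToLane] at hm
    rcases List.mem_flatMap.1 hm with ⟨p, hp, hin⟩
    rcases List.mem_map.1 hin with ⟨t, ht, heq⟩
    cases heq
    exact ⟨p, hp, rfl, ht⟩
  · rintro ⟨p, hp, rfl, hn⟩
    apply PySem.Dict.get?_of_mem_items tagToLane _ pv_nodup_tagKeys
    rw [pv_items_tagToLane]
    exact List.mem_flatMap.2 ⟨p, hp, List.mem_map.2 ⟨n, hn, rfl⟩⟩

-- counting swap for two duplicate-free lists
lemma pv_filter_length_comm (l₁ l₂ : List String) (h₁ : l₁.Nodup) (h₂ : l₂.Nodup) :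
    (l₁.filter (fun x => x ∈ l₂)).length = (l₂.filter (fun x => x ∈ l₁)).length := by
  have key : ∀ (a b : List String), a.Nodup →
      (a.filter (fun x => x ∈ b)).length = (a.toFinset ∩ b.toFinset).card := by
    intro a b ha
    rw [← List.toFinset_card_of_nodup (ha.filter _)]
    congr 1
    ext x
    simp
  rw [key _ _ h₁, key _ _ h₂, Finset.inter_comm]

-- per-lane score: |seeds ∩ S| = number of names of S the index sends to that lane
lemma pv_count_eq (S : List String) (hS : S.Nodup) (p : String × PySem.Set String)
    (hp : p ∈ laneSeeds.items) :
    PySem.Set.len (PySem.Set.inter p.2 S)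
      = ((S.countP (fun n => tagToLane.get? n == some p.1) : Nat) : Int) := by
  have hcongr : ∀ n ∈ S, (tagToLane.get? n == some p.1) = true ↔
      (decide (n ∈ (p.2 : List String))) = true := by
    intro n _
    simp only [beq_iff_eq, decide_eq_true_eq]
    rw [pv_get_tagToLane]
    constructor
    · rintro ⟨q, hq, hfst, hn⟩
      exact (pv_eq_of_fst_eq pv_nodup_lanes hp hq hfst) ▸ hn
    · intro hn
      exact ⟨p, hp, rfl, hn⟩
  have hswap := pv_filter_length_comm (p.2 : List String) S (pv_seed_nodup p hp) hS
  have hfilter : List.filter (fun x => List.contains S x) (p.2 : List String)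
      = List.filter (fun x => decide (x ∈ S)) (p.2 : List String) :=
    List.filter_congr (fun x _ => by simp)
  simp only [PySem.Set.len, PySem.Set.inter, PySem.Set.contains]
  rw [hfilter, hswap, ← List.countP_eq_length_filter, ← List.countP_congr hcongr]

-- unrolling B's tally loop: each lane's counter counts the names the index sends to it
lemma pv_getD_foldTally (ns : List String) (d : PySem.Dict String Int) (l : String) :
    (ns.foldl laneTally d).getD l 0
      = d.getD l 0 + ((ns.countP (fun n => tagToLane.get? n == some l) : Nat) : Int) := by
  induction ns generalizing d with
  | nil => simp
  | cons n ns ih =>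
    rw [List.foldl_cons, ih]
    cases h : tagToLane.get? n with
    | none =>
      have hstep : laneTally d n = d := by unfold laneTally; rw [h]
      have hbeq : ((none : Option String) == some l) = false := rfl
      rw [hstep, List.countP_cons, h, hbeq, if_neg Bool.false_ne_true]
      push_cast
      ring
    | some lane =>
      have hstep : laneTally d n = d.modify lane 0 (fun v => v + 1) := by
        unfold laneTally; rw [h]
      rw [hstep, List.countP_cons, h, PySem.Dict.getD_modify]
      by_cases hl : l = lane
      · subst hl
        rw [if_pos rfl]
        have hbeq : (some l == some l) = true := by simp
        rw [hbeq, if_pos rfl]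
        push_cast
        ring
      · rw [if_neg hl]
        have hbeq : (some lane == some l) = false := by
          simp only [beq_eq_false_iff_ne, ne_eq, Option.some.injEq]
          exact fun hx => hl hx.symm
        rw [hbeq, if_neg Bool.false_ne_true]
        push_cast
        ring

-- a literal dict with distinct keys has exactly its listed items
lemma pv_items_ofList {ν : Type} (L : List (String × ν)) (h : (L.map (fun p => p.1)).Nodup) :
    (PySem.Dict.ofList L).items = L := by
  show (List.foldl (fun acc p => acc.insert p.1 p.2) PySem.Dict.empty L).items = L
  rw [PySem.Dict.items_foldl_insert_fresh L (fun p => p.1) (fun p => p.2) PySem.Dict.empty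
      (fun a _ => PySem.Dict.contains_empty _) h]
  simp [PySem.Dict.empty]

-- A's score dictionary, named for the proofs
def pvScoresA (S : PySem.Set String) : PySem.Dict String Int :=
  PySem.Dict.ofList (laneSeeds.items.map (fun p =>
    (p.1, PySem.Set.len (PySem.Set.inter p.2 S))))

lemma pv_scoresA_items (S : PySem.Set String) :
    (pvScoresA S).items = laneSeeds.items.map (fun p =>
      (p.1, PySem.Set.len (PySem.Set.inter p.2 S))) := by
  apply pv_items_ofList
  have : (laneSeeds.items.map (fun p =>
      (p.1, PySem.Set.len (PySem.Set.inter p.2 S)))).map (fun p => p.1) = pvLanes := by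
    rw [List.map_map]; rfl
  rw [this]; exact pv_nodup_lanes

lemma pv_scoresA_keys (S : PySem.Set String) : (pvScoresA S).keys = pvLanes := by
  show (pvScoresA S).items.map (fun x => x.1) = pvLanes
  rw [pv_scoresA_items, List.map_map]; rfl

-- the two score functions agree on EVERY string (missing keys default to 0 on both sides)
lemma pv_getD_eq (S : List String) (hS : S.Nodup) (l : String) :
    (pvScoresA S).getD l 0 = (S.foldl laneTally PySem.Dict.empty).getD l 0 := by
  rw [pv_getD_foldTally, PySem.Dict.getD_empty, zero_add]
  by_cases hl : ∃ p ∈ laneSeeds.items, l = p.1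
  · obtain ⟨p, hp, rfl⟩ := hl
    have hmem : (p.1, PySem.Set.len (PySem.Set.inter p.2 S)) ∈ (pvScoresA S).items := by
      rw [pv_scoresA_items]
      exact List.mem_map.2 ⟨p, hp, rfl⟩
    rw [PySem.Dict.getD_of_mem_items _ hmem (by rw [show (pvScoresA S).keys = pvLanes from pv_scoresA_keys S]; exact pv_nodup_lanes) 0]
    exact pv_count_eq S hS p hp
  · have hcz : ∀ n ∈ S, (tagToLane.get? n == some l) = false := by
      intro n _
      cases h : tagToLane.get? n with
      | none => rfl
      | some l' =>
        rcases (pv_get_tagToLane n l').1 h with ⟨p, hp, rfl, -⟩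
        simp only [beq_eq_false_iff_ne, ne_eq, Option.some.injEq]
        exact fun he => hl ⟨p, hp, he.symm⟩
    have hcount : S.countP (fun n => tagToLane.get? n == some l) = 0 := by
      rw [List.countP_eq_zero]
      intro n hn
      simp [hcz n hn]
    have hnc : (pvScoresA S).contains l = false := by
      rw [← Bool.not_eq_true, PySem.Dict.contains_iff_mem_keys, pv_scoresA_keys]
      intro hmem
      rcases List.mem_map.1 hmem with ⟨p, hp, he⟩
      exact hl ⟨p, hp, he.symm⟩
    have hget : (pvScoresA S).get? l = none := (PySem.Dict.get?_eq_none_iff_contains _ _).2 hnc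
    simp [PySem.Dict.getD, hget, hcount]

-- ===== the shared tail: Python max over the lane scores vs B's strict running-best scan =====

def pvG (f : String → Int) (m x : String) : String := if f m < f x then x else m

def pvPickA (L : List String) (f : String → Int) : Option String :=
  match PySem.List.max? L f with
  | none => none
  | some b => if f b > 0 then some b else none

def pvPickB (L : List String) (f : String → Int) : Option String :=
  (L.foldl (fun p l => if f l > p.2 then (some l, f l) else p)
    ((none : Option String), (0 : Int))).1

lemma pv_max?_cons (f : String → Int) (t : List String) : ∀ (x : String),
    PySem.List.max? (x :: t) f = some (t.foldl (pvG f) x) := by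
  induction t with
  | nil => intro x; rfl
  | cons y t ih =>
    intro x
    have h2 : PySem.List.max? (x :: y :: t) f = PySem.List.max? (pvG f x y :: t) f := by
      simp only [PySem.List.max?, List.foldl_cons]
      congr 1
      unfold pvG
      split_ifs with h <;> rfl
    rw [h2, ih, List.foldl_cons]

lemma pv_le_fold (f : String → Int) (t : List String) : ∀ (m : String),
    f m ≤ f (t.foldl (pvG f) m) := by
  induction t with
  | nil => intro m; exact le_refl _
  | cons x t ih =>
    intro m
    rw [List.foldl_cons]
    refine le_trans ?_ (ih (pvG f m x))
    unfold pvG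
    split_ifs with h
    · exact le_of_lt h
    · exact le_refl _

lemma pv_pickA_cons_nonpos (f : String → Int) (t : List String) : ∀ (x : String),
    f x ≤ 0 → pvPickA (x :: t) f = pvPickA t f := by
  induction t with
  | nil =>
    intro x hx
    unfold pvPickA
    rw [pv_max?_cons]
    show (if f x > 0 then some x else none) = _
    rw [if_neg (by omega)]
    rfl
  | cons y t ih =>
    intro x hx
    by_cases h : f x < f y
    · unfold pvPickA
      rw [pv_max?_cons, pv_max?_cons, List.foldl_cons,
        show pvG f x y = y from by unfold pvG; rw [if_pos h]]
    · have hy : f y ≤ 0 := le_trans (not_lt.1 h) hx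
      have hstep : pvPickA (x :: y :: t) f = pvPickA (x :: t) f := by
        unfold pvPickA
        rw [pv_max?_cons, pv_max?_cons, List.foldl_cons,
          show pvG f x y = x from by unfold pvG; rw [if_neg h]]
      rw [hstep, ih x hx, ← ih y hy]

lemma pv_pickB_from_some (f : String → Int) (t : List String) : ∀ (b : String),
    t.foldl (fun p l => if f l > p.2 then (some l, f l) else p) (some b, f b)
      = (some (t.foldl (pvG f) b), f (t.foldl (pvG f) b)) := by
  induction t with
  | nil => intro b; rfl
  | cons x t ih =>
    intro b
    show t.foldl _ (if f x > f b then (some x, f x) else (some b, f b))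
      = (some ((x :: t).foldl (pvG f) b), _)
    rw [List.foldl_cons]
    by_cases h : f b < f x
    · rw [if_pos h, show pvG f b x = x from by unfold pvG; rw [if_pos h]]
      exact ih x
    · rw [if_neg h, show pvG f b x = b from by unfold pvG; rw [if_neg h]]
      exact ih b

lemma pv_pickB_eq_pickA (f : String → Int) (L : List String) :
    pvPickB L f = pvPickA L f := by
  induction L with
  | nil => rfl
  | cons x t ih =>
    by_cases h : f x > 0
    · unfold pvPickB pvPickA
      rw [pv_max?_cons]
      show (t.foldl _ (if f x > (0 : Int) then (some x, f x) else (none, 0))).1 = _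
      rw [if_pos h, pv_pickB_from_some]
      have hpos : f (t.foldl (pvG f) x) > 0 := lt_of_lt_of_le h (pv_le_fold f t x)
      simp [hpos]
    · rw [pv_pickA_cons_nonpos f t x (not_lt.1 h), ← ih]
      unfold pvPickB
      show (t.foldl _ (if f x > (0 : Int) then (some x, f x) else (none, 0))).1 = _
      rw [if_neg h]

-- A's tail, taken at the whole score dictionary (bridges A's inline match to pvPickA)
def pvPick (scores : PySem.Dict String Int) : Option String :=
  match PySem.List.max? scores.keys (fun l => scores.getD l 0) with
  | none => none
  | some best => if scores.getD best 0 > 0 then some best else none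

lemma pv_pick_eq (d : PySem.Dict String Int) :
    pvPick d = pvPickA d.keys (fun l => d.getD l 0) := rfl

-- the two score functions, packaged for the final rewrite
lemma pv_getD_eq' (xs : List String) :
    (fun l => (pvScoresA (PySem.Set.ofList xs)).getD l 0)
      = (fun l => ((PySem.Set.ofList xs).foldl laneTally PySem.Dict.empty).getD l 0) :=
  funext (fun l => pv_getD_eq (PySem.Set.ofList xs) (PySem.Set.nodup_ofList xs) l)

-- ===== VERDICT (by name: the statement is the Claim_ definition above) =====
set_option maxHeartbeats 1600000 in
theorem assign_lane_spec : Claim_equal_assign_lane := by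
  intro tags _
  show assign_lane tags = assign_lane_alt tags
  have hA : assign_lane tags = pvPick (PySem.Dict.ofList (laneSeeds.items.map (fun p => (p.1, PySem.Set.len (PySem.Set.inter p.2 (PySem.Set.ofList (tags.map (fun t => t.1)))))))) := rfl
  have hS : (PySem.Dict.ofList (laneSeeds.items.map (fun p => (p.1, PySem.Set.len (PySem.Set.inter p.2 (PySem.Set.ofList (tags.map (fun t => t.1)))))))) = pvScoresA (PySem.Set.ofList (tags.map (fun t => t.1))) := rfl
  rw [hA, hS, pv_pick_eq]
  have hB : assign_lane_alt tags
      = pvPickB lanesB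
          (fun l => ((PySem.Set.ofList (tags.map (fun t => t.1))).foldl laneTally
            PySem.Dict.empty).getD l 0) := rfl
  rw [hB, pv_scoresA_keys, pv_pickB_eq_pickA, pv_lanesB_eq,
    pv_getD_eq' (tags.map (fun t => t.1))]
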